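-- pv_equiv track=rewrite | github.com/Dhanusri5007/Sarcasm-detection | detect_sarcasm.py | detect_sarcasm
-- ===== SOURCE A (Python) =====
-- def detect_sarcasm(sentence):
--     s = sentence.lower()
--
--     positive_words = ["great", "amazing", "love", "nice", "good", "awesome", "perfect"]
--     negative_words = ["bad", "worst", "late", "tired", "failed", "error", "rain", "problem", "stuck", "missed"]
--
--     sarcastic_phrases = ["yeah right", "as if", "just what i needed", "of course", "how nice"]
--
--     score = 0
--
--     #  Direct sarcastic phrases
--     for phrase in sarcastic_phrases:
--         if phrase in s:
--             return "Sarcastic"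
--
--     #  Positive + Negative words together
--     for p in positive_words:
--         for n in negative_words:
--             if p in s and n in s:
--                 score += 2
--
--     #  Positive word with bad situation
--     bad_situations = ["traffic", "exam", "delay", "bug", "issue", "problem"]
--
--     for p in positive_words:
--         for b in bad_situations:
--             if p in s and b in s:
--                 score += 1
--
--     # Final decision
--     if score >= 2:
--         return "Sarcastic"
--     else:
--         return "Not Sarcastic"
-- ===== SOURCE B (Python) =====
-- def detect_sarcasm(sentence):
--     s = sentence.lower()
--
--     positive_words = ["great", "amazing", "love", "nice", "good", "awesome", "perfect"]
--     negative_words = ["bad", "worst", "late", "tired", "failed", "error", "rain", "problem", "stuck", "missed"]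
--     sarcastic_phrases = ["yeah right", "as if", "just what i needed", "of course", "how nice"]
--     bad_situations = ["traffic", "exam", "delay", "bug", "issue", "problem"]
--
--     if any(phrase in s for phrase in sarcastic_phrases):
--         return "Sarcastic"
--
--     p = sum(1 for w in positive_words if w in s)
--     n = sum(1 for w in negative_words if w in s)
--     b = sum(1 for w in bad_situations if w in s)
--
--     # each (positive, negative) pair adds 2 and each (positive, bad) pair adds 1
--     score = 2 * p * n + p * b
--     return "Sarcastic" if score >= 2 else "Not Sarcastic"
-- ===== Notes on version B (the rewrite author's own statement) =====
-- stated objective: simpler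
-- what changed: Replaced the two nested pair-scoring loops with three one-pass word counts (p, n, b) and the closed-form score 2*p*n + p*b, which equals the pairwise sum since every present pair contributes independently.
import Mathlib
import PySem

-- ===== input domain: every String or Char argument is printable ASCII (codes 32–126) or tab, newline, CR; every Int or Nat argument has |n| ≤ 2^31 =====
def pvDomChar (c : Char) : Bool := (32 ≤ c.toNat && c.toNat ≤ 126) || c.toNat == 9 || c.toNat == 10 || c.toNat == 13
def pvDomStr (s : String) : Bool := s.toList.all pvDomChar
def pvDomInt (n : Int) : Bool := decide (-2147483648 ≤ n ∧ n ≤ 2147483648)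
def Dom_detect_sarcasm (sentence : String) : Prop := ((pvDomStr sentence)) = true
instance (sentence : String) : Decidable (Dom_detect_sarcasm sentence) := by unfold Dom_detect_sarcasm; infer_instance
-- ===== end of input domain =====

-- B replaces A's nested pair-scoring loops by word counts and the closed form 2*p*n + p*b (simpler).

-- ===== PORT A =====
def detect_sarcasm (sentence : String) : String :=
  let s := PySem.Str.lower sentence
  let positive_words := ["great", "amazing", "love", "nice", "good", "awesome", "perfect"]
  let negative_words := ["bad", "worst", "late", "tired", "failed", "error", "rain", "problem", "stuck", "missed"]
  let sarcastic_phrases := ["yeah right", "as if", "just what i needed", "of course", "how nice"]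
  -- 'for phrase in …: if phrase in s: return "Sarcastic"' — early return = any
  if sarcastic_phrases.any (fun phrase => PySem.Str.isIn phrase s) then "Sarcastic"
  else
    let score : Int :=
      positive_words.foldl (fun acc p =>
        negative_words.foldl (fun acc n =>
          if PySem.Str.isIn p s && PySem.Str.isIn n s then acc + 2 else acc) acc) 0
    let bad_situations := ["traffic", "exam", "delay", "bug", "issue", "problem"]
    let score :=
      positive_words.foldl (fun acc p =>
        bad_situations.foldl (fun acc b =>
          if PySem.Str.isIn p s && PySem.Str.isIn b s then acc + 1 else acc) acc) score
    if score ≥ 2 then "Sarcastic" else "Not Sarcastic"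

-- ===== PORT B =====
def detect_sarcasm_alt (sentence : String) : String :=
  let s := PySem.Str.lower sentence
  let positive_words := ["great", "amazing", "love", "nice", "good", "awesome", "perfect"]
  let negative_words := ["bad", "worst", "late", "tired", "failed", "error", "rain", "problem", "stuck", "missed"]
  let sarcastic_phrases := ["yeah right", "as if", "just what i needed", "of course", "how nice"]
  let bad_situations := ["traffic", "exam", "delay", "bug", "issue", "problem"]
  if sarcastic_phrases.any (fun phrase => PySem.Str.isIn phrase s) then "Sarcastic"
  else
    let p : Int := positive_words.countP (fun w => PySem.Str.isIn w s)
    let n : Int := negative_words.countP (fun w => PySem.Str.isIn w s)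
    let b : Int := bad_situations.countP (fun w => PySem.Str.isIn w s)
    let score : Int := 2 * p * n + p * b
    if score ≥ 2 then "Sarcastic" else "Not Sarcastic"

-- ===== PRECONDITION & SPEC =====
def Spec_detect_sarcasm (sentence : String) (out : String) : Prop := out = detect_sarcasm_alt sentence
instance (sentence : String) (out : String) : Decidable (Spec_detect_sarcasm sentence out) := by unfold Spec_detect_sarcasm; infer_instance

-- ===== CLAIM (what is proved, stated in full; the proofs are below) =====
def Claim_equal_detect_sarcasm : Prop := ∀ (sentence : String), Dom_detect_sarcasm sentence → Spec_detect_sarcasm sentence (detect_sarcasm sentence)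

-- ===== LEMMAS AND PROOFS =====

-- inner loop over N with a fixed outer word p: adds c per hit when 'g p' holds
theorem inner_foldl (N : List String) (g : String → Bool) (b : Bool) (c acc : Int) :
    N.foldl (fun acc n => if b && g n then acc + c else acc) acc
      = acc + (if b then c * (N.countP g : Nat) else 0) := by
  induction N generalizing acc with
  | nil => simp
  | cons x xs ih =>
    simp only [List.foldl_cons, List.countP_cons, ih]
    cases hb : b <;> cases hg : g x <;> simp <;> ring

-- nested pair loop = c * (count in P) * (count in N)
theorem nested_foldl (P N : List String) (g : String → Bool) (c acc : Int) :
    P.foldl (fun acc p => N.foldl (fun acc n => if g p && g n then acc + c else acc) acc) acc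
      = acc + c * (P.countP g : Nat) * (N.countP g : Nat) := by
  induction P generalizing acc with
  | nil => simp
  | cons x xs ih =>
    simp only [List.foldl_cons, inner_foldl N g (g x) c acc, ih, List.countP_cons]
    cases hg : g x
    · simp
    · simp
      ring

-- ===== VERDICT (by name: the statement is the Claim_ definition above) =====
theorem detect_sarcasm_spec : Claim_equal_detect_sarcasm := by
  intro sentence _
  unfold Spec_detect_sarcasm detect_sarcasm detect_sarcasm_alt
  simp only [nested_foldl]
  split
  · rfl
  · ring_nf
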